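-- pv_equiv track=rewrite | github.com/hoonjaelee15/YANG_Parser | yang_parsor.py | extract_section_from_description
-- ===== SOURCE A (Python) =====
-- def extract_section_from_description(description, keywords):
--     if not description:
--         return None
--
--     lines = description.splitlines()
--     result_lines = []
--     in_section = False
--
--     for line in lines:
--         lower_line = line.lower()
--         if any(kw in lower_line for kw in keywords):
--             in_section = True
--             result_lines.append(line.strip())
--         elif in_section:
--             if line.strip() == "":
--                 break
--             result_lines.append(line.strip())
--
--     return '\n'.join(result_lines) if result_lines else None
-- ===== SOURCE B (Python) =====
-- def extract_section_from_description(description, keywords):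
--     # Two-phase: find the first keyword line, then collect stripped lines
--     # until a keyword-free blank line.
--     if not description:
--         return None
--     lines = description.splitlines()
--
--     def has_kw(line):
--         low = line.lower()
--         return any(kw in low for kw in keywords)
--
--     start = next((i for i, l in enumerate(lines) if has_kw(l)), None)
--     if start is None:
--         return None
--     out = []
--     for line in lines[start:]:
--         if not has_kw(line) and line.strip() == "":
--             break
--         out.append(line.strip())
--     return '\n'.join(out)
-- ===== Notes on version B (the rewrite author's own statement) =====
-- stated objective: alternative
-- what changed: Replaced the in_section boolean state machine by a two-phase decomposition: first locate the first keyword line, then collect stripped lines from there until a keyword-free blank line.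
import Mathlib
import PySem

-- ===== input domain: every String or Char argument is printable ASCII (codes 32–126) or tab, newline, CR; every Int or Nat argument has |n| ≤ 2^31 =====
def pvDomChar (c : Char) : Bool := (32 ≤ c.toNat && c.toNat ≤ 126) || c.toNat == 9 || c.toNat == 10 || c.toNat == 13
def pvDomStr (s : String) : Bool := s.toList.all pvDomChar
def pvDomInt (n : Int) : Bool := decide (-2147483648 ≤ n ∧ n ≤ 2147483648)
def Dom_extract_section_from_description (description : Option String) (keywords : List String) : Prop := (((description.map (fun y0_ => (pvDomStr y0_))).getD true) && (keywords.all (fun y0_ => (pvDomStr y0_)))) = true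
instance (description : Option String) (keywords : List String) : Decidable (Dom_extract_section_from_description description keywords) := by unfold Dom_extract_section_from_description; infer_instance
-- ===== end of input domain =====

-- B replaces A's in_section state machine by a find-first-keyword-line phase followed
-- by a collect-until-blank phase; same cost, different decomposition.

-- ===== PORT A =====
-- the for-loop of A, with its (result_lines, in_section) state; returning the
-- accumulated list models the 'break'
def pvALoop (keywords : List String) : List String → List String → Bool → List String
  | [], acc, _ => acc
  | line :: rest, acc, inSec =>
    let lowerLine := PySem.Str.lower line
    if keywords.any (fun kw => PySem.Str.isIn kw lowerLine) then
      pvALoop keywords rest (acc ++ [PySem.Str.strip line]) true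
    else if inSec then
      if PySem.Str.strip line = "" then acc
      else pvALoop keywords rest (acc ++ [PySem.Str.strip line]) inSec
    else pvALoop keywords rest acc inSec

def extract_section_from_description (description : Option String) (keywords : List String) : Option String :=
  match description with
  | none => none
  | some d =>
    if d = "" then none   -- 'if not description'
    else
      let lines := PySem.Str.splitlines d
      let resultLines := pvALoop keywords lines [] false
      if resultLines = [] then none else some (PySem.Str.join "\n" resultLines)

-- ===== PORT B =====
def pvHasKw (keywords : List String) (line : String) : Bool :=
  let low := PySem.Str.lower line
  keywords.any (fun kw => PySem.Str.isIn kw low)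

-- phase 2: collect stripped lines until a keyword-free blank line ('break')
def pvCollect (keywords : List String) : List String → List String
  | [] => []
  | line :: rest =>
    if ¬ pvHasKw keywords line ∧ PySem.Str.strip line = "" then []
    else PySem.Str.strip line :: pvCollect keywords rest

def extract_section_from_description_alt (description : Option String) (keywords : List String) : Option String :=
  match description with
  | none => none
  | some d =>
    if d = "" then none
    else
      let lines := PySem.Str.splitlines d
      match lines.findIdx? (pvHasKw keywords) with   -- 'next((i for i, l in enumerate(lines) if has_kw(l)), None)'
      | none => none
      | some start => some (PySem.Str.join "\n" (pvCollect keywords (lines.drop start)))  -- lines[start:] with start ≥ 0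

-- ===== PRECONDITION & SPEC =====
def Spec_extract_section_from_description (description : Option String) (keywords : List String) (out : Option String) : Prop := out = extract_section_from_description_alt description keywords
instance (description : Option String) (keywords : List String) (out : Option String) : Decidable (Spec_extract_section_from_description description keywords out) := by unfold Spec_extract_section_from_description; infer_instance

-- ===== CLAIM (what is proved, stated in full; the proofs are below) =====
def Claim_equal_extract_section_from_description : Prop := ∀ (description : Option String) (keywords : List String), Dom_extract_section_from_description description keywords → Spec_extract_section_from_description description keywords (extract_section_from_description description keywords)

-- ===== LEMMAS AND PROOFS =====

theorem pvDropOfFindIdx? {α : Type} (p : α → Bool) : ∀ (xs : List α) (i : Nat), xs.findIdx? p = some i → ∃ l rest, xs.drop i = l :: rest ∧ p l = true := by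
  intro xs
  induction xs with
  | nil => intro i h; simp at h
  | cons x xs ih =>
    intro i h
    rw [List.findIdx?_cons] at h
    by_cases hp : p x = true
    · simp [hp] at h; exact ⟨x, xs, by simp [← h], hp⟩
    · simp [hp] at h
      obtain ⟨j, hj, rfl⟩ := h
      simpa using ih j hj

-- once in_section, A's loop appends exactly what pvCollect collects
theorem pvALoop_true (keywords : List String) (lines acc : List String) :
    pvALoop keywords lines acc true = acc ++ pvCollect keywords lines := by
  induction lines generalizing acc with
  | nil => simp [pvALoop, pvCollect]
  | cons line rest ih =>
    have hc : (keywords.any fun kw => PySem.Str.isIn kw (PySem.Str.lower line)) = pvHasKw keywords line := rfl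
    cases h : pvHasKw keywords line with
    | true => simp only [pvALoop, hc, h, if_true, ih, pvCollect]; simp
    | false =>
      simp only [pvALoop, hc, h, pvCollect, Bool.false_eq_true, if_false, if_true]
      by_cases hb : PySem.Str.strip line = "" <;> simp [hb, ih]

-- before in_section, A's loop skips to the first keyword line, then collects
theorem pvALoop_false (keywords : List String) (lines acc : List String) :
    pvALoop keywords lines acc false =
      match lines.findIdx? (pvHasKw keywords) with
      | none => acc
      | some start => acc ++ pvCollect keywords (lines.drop start) := by
  induction lines generalizing acc with
  | nil => simp [pvALoop]
  | cons line rest ih =>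
    have hc : (keywords.any fun kw => PySem.Str.isIn kw (PySem.Str.lower line)) = pvHasKw keywords line := rfl
    rw [List.findIdx?_cons]
    cases h : pvHasKw keywords line with
    | true =>
      simp only [pvALoop, hc, h, if_true, pvALoop_true, pvCollect, List.drop_zero]
      simp
    | false =>
      simp only [pvALoop, hc, h, Bool.false_eq_true, if_false, ih]
      cases hfi : rest.findIdx? (pvHasKw keywords) with
      | none => simp
      | some i => simp

theorem pvCollect_ne_nil (keywords : List String) (line : String) (rest : List String)
    (h : pvHasKw keywords line = true) :
    pvCollect keywords (line :: rest) ≠ [] := by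
  simp [pvCollect, h]

-- ===== VERDICT (by name: the statement is the Claim_ definition above) =====
theorem extract_section_from_description_spec : Claim_equal_extract_section_from_description := by
  intro description keywords _
  show _ = _
  match description with
  | none => rfl
  | some d =>
    simp only [extract_section_from_description, extract_section_from_description_alt]
    by_cases hd : d = ""
    · simp [hd]
    · simp only [hd, if_false, pvALoop_false]
      cases hfi : (PySem.Str.splitlines d).findIdx? (pvHasKw keywords) with
      | none => simp
      | some start =>
        obtain ⟨l, rest, hdrop, hl⟩ := pvDropOfFindIdx? (pvHasKw keywords) _ _ hfi
        have hne : pvCollect keywords ((PySem.Str.splitlines d).drop start) ≠ [] := by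
          rw [hdrop]; exact pvCollect_ne_nil _ _ _ hl
        simp [hne]
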